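-- pv_equiv track=rewrite | github.com/pypi-data/pypi-mirror-329 | packages/SankeyExcelParser/SankeyExcelParser-1.0.0b0.tar.gz/SankeyExcelParser-1.0.0b0/SankeyExcelParser/io_excel.py | _hasDuplicatedEntry
-- ===== SOURCE A (Python) =====
-- def _hasDuplicatedEntry(entries: list):
--     """
--     """
--     duplicates = {}
--     for (i, entry) in enumerate(entries):
--         if entries.count(entry) > 1:
--             if entry not in duplicates.keys():
--                 duplicates[entry] = []
--             duplicates[entry].append(i)
--     # duplicates = [entry for entry in entries if entries.count(entry) > 1]
--     return (len(duplicates) > 0), duplicates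
-- ===== SOURCE B (Python) =====
-- def _hasDuplicatedEntry(entries: list):
--     """
--     """
--     counts = {}
--     for entry in entries:
--         counts[entry] = counts.get(entry, 0) + 1
--     duplicates = {}
--     for (entry, c) in counts.items():
--         if c > 1:
--             duplicates[entry] = [i for i in range(len(entries)) if entries[i] == entry]
--     return (len(duplicates) > 0), duplicates
-- ===== Notes on version B (the rewrite author's own statement) =====
-- stated objective: faster
-- what changed: B is two staged passes: a counting pass building entry->count, then a pass over the count table that, for each entry seen more than once, reconstructs its index list with a range scan; A instead re-scans the whole list with entries.count() at every element while appending indices.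
import Mathlib
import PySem

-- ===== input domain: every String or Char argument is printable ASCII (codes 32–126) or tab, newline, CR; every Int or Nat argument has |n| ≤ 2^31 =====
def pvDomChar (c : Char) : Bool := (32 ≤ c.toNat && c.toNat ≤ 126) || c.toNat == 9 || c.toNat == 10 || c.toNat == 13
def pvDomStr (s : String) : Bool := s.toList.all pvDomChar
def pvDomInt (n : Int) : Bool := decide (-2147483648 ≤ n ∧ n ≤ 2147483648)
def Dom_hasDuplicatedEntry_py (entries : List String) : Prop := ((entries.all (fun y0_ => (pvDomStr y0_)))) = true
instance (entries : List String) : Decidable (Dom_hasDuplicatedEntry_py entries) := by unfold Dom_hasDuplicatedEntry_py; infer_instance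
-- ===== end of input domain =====

-- B replaces A's per-element entries.count() re-scan inside the index-collecting loop by two staged
-- passes: a counting pass (entry -> count), then, per entry counted more than once, a range scan
-- rebuilding that entry's index list (objective: faster by a constant-factor mechanism).

-- ===== PORT A =====
-- loop body of A: if entries.count(entry) > 1: ensure key exists (empty list), then append i
-- (dict as assoc list in insertion order; the in-place list append is the map on the unique matching key)
def pvStepA (entries : List String) (d : List (String × List Int)) (p : Int × String) :
    List (String × List Int) :=
  if (1 : Int) < PySem.List.count entries p.2 then
    let d1 := if d.any (fun kv => kv.1 == p.2) then d else d ++ [(p.2, ([] : List Int))]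
    d1.map (fun kv => if kv.1 == p.2 then (kv.1, kv.2 ++ [p.1]) else kv)
  else d

def hasDuplicatedEntry_py (entries : List String) : Bool × (List (String × List Int)) :=
  let duplicates := (PySem.List.enumerate entries).foldl (pvStepA entries) []
  (decide (0 < duplicates.length), duplicates)

-- ===== PORT B =====
-- pass 1: counts[entry] = counts.get(entry, 0) + 1;  pass 2: over counts.items(), if c > 1 bind
-- duplicates[entry] = [i for i in range(len(entries)) if entries[i] == entry]
-- (the comprehension's entries[i] is exact as pyGetD: every i in range(len(entries)) is in bounds)
def hasDuplicatedEntry_py_alt (entries : List String) : Bool × (List (String × List Int)) :=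
  let counts : PySem.Dict String Int :=
    entries.foldl (fun d e => d.insert e (d.getD e 0 + 1)) PySem.Dict.empty
  let duplicates := counts.items.foldl (fun acc p =>
    if (1 : Int) < p.2 then
      acc ++ [(p.1, (PySem.List.pyRange 0 (entries.length : Int) 1).filter
        (fun i => PySem.List.pyGetD entries i "" == p.1))]
    else acc) []
  (decide (0 < duplicates.length), duplicates)

-- ===== PRECONDITION & SPEC =====
def Spec_hasDuplicatedEntry_py (entries : List String) (out : Bool × (List (String × List Int))) : Prop := out = hasDuplicatedEntry_py_alt entries
instance (entries : List String) (out : Bool × (List (String × List Int))) : Decidable (Spec_hasDuplicatedEntry_py entries out) := by unfold Spec_hasDuplicatedEntry_py; infer_instance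

-- ===== CLAIM (what is proved, stated in full; the proofs are below) =====
def Claim_equal_hasDuplicatedEntry_py : Prop := ∀ (entries : List String), Dom_hasDuplicatedEntry_py entries → Spec_hasDuplicatedEntry_py entries (hasDuplicatedEntry_py entries)

-- ===== LEMMAS AND PROOFS =====

-- proof-only intermediate: the plain grouping step (append index i under key entry, new keys last)
def pvStepG (m : List (String × List Int)) (p : Int × String) : List (String × List Int) :=
  if m.any (fun kv => kv.1 == p.2) then
    m.map (fun kv => if kv.1 == p.2 then (kv.1, kv.2 ++ [p.1]) else kv)
  else m ++ [(p.2, [p.1])]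

-- the key predicate A's count test amounts to
def pvQ (entries : List String) (kv : String × List Int) : Bool :=
  decide ((1 : Int) < PySem.List.count entries kv.1)

-- a map that only changes values (never keys) commutes with a key filter
theorem pv_filter_map_comm {α : Type} (q : α → Bool) (f : α → α)
    (h : ∀ x, q (f x) = q x) (m : List α) :
    (m.map f).filter q = (m.filter q).map f := by
  rw [List.filter_map]
  exact congrArg _ (List.filter_congr (fun x _ => h x))

theorem pv_map_id_on {α : Type} (f : α → α) (m : List α) (h : ∀ x ∈ m, f x = x) :
    m.map f = m :=
  (List.map_congr_left (g := id) h).trans (List.map_id m)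

-- membership of a key passing the filter is unchanged by the filter
theorem pv_any_filter (q : String × List Int → Bool) (k : String)
    (h : ∀ kv : String × List Int, kv.1 = k → q kv = true) (m : List (String × List Int)) :
    (m.filter q).any (fun kv => kv.1 == k) = m.any (fun kv => kv.1 == k) := by
  induction m with
  | nil => rfl
  | cons kv m ih =>
    by_cases hb : kv.1 = k
    · simp [List.filter, h kv hb, hb]
    · by_cases hq : q kv = true
      · simp [List.filter, hq, ih]
      · simp [List.filter, hq, ih]
        exact fun hk => absurd hk hb

-- one step of A on the filtered map = filter of one grouping step
theorem pv_step_comm (entries : List String) (p : Int × String) (m : List (String × List Int)) :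
    pvStepA entries (m.filter (pvQ entries)) p = (pvStepG m p).filter (pvQ entries) := by
  unfold pvStepA pvStepG
  set f : String × List Int → String × List Int :=
    fun kv => if kv.1 == p.2 then (kv.1, kv.2 ++ [p.1]) else kv with hf
  have hfkey : ∀ kv, pvQ entries (f kv) = pvQ entries kv := by
    intro kv; simp only [hf, pvQ]; split <;> rfl
  by_cases hc : (1 : Int) < PySem.List.count entries p.2
  · have hq2 : ∀ kv : String × List Int, kv.1 = p.2 → pvQ entries kv = true := by
      intro kv hk
      simp only [pvQ, hk, decide_eq_true_eq, PySem.List.count_eq]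
      exact_mod_cast hc
    rw [pv_any_filter (pvQ entries) p.2 hq2 m]
    by_cases hm : m.any (fun kv => kv.1 == p.2) = true
    · simp only [hc, if_pos, hm]
      exact (pv_filter_map_comm (pvQ entries) f hfkey m).symm
    · simp only [hc, if_pos, hm, if_false, Bool.false_eq_true]
      rw [List.filter_append, List.map_append]
      have hnew : pvQ entries (p.2, ([p.1] : List Int)) = true := hq2 _ rfl
      have hnone : ∀ kv ∈ m.filter (pvQ entries), f kv = kv := by
        intro kv hkv
        have hkm : kv ∈ m := List.mem_of_mem_filter hkv
        have : kv.1 ≠ p.2 := by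
          intro he
          exact hm (List.any_eq_true.mpr ⟨kv, hkm, by simp [he]⟩)
        simp [hf, this]
      rw [pv_map_id_on f _ hnone]
      simp [hf, hnew, List.filter]
  · simp only [hc, if_false]
    by_cases hm : m.any (fun kv => kv.1 == p.2) = true
    · simp only [hm, if_true]
      rw [pv_filter_map_comm (pvQ entries) f hfkey m]
      refine (pv_map_id_on f _ ?_).symm
      intro kv hkv
      have hq : pvQ entries kv = true := List.of_mem_filter hkv
      have : kv.1 ≠ p.2 := by
        intro he
        exact hc (by simpa [pvQ, he] using hq)
      simp [hf, this]
    · simp only [hm, if_false, Bool.false_eq_true]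
      have hcn : List.count p.2 entries ≤ 1 := by exact_mod_cast le_of_not_gt hc
      have : pvQ entries (p.2, ([p.1] : List Int)) = false := by
        simp [pvQ, PySem.List.count_eq]; omega
      simp [List.filter_append, List.filter, this]

-- the whole of A's fold on a filtered map = filter of the grouping fold
theorem pv_fold_comm (entries : List String) (ps : List (Int × String))
    (m : List (String × List Int)) :
    ps.foldl (pvStepA entries) (m.filter (pvQ entries)) = (ps.foldl pvStepG m).filter (pvQ entries) := by
  induction ps generalizing m with
  | nil => rfl
  | cons p ps ih =>
    simp only [List.foldl_cons]
    rw [pv_step_comm entries p m]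
    exact ih (pvStepG m p)

-- the index list the grouping fold associates with key k
def pvIdx (ps : List (Int × String)) (k : String) : List Int :=
  ps.filterMap (fun p => if p.2 == k then some p.1 else none)

-- full characterisation of the grouping fold: first-occurrence-ordered keys, each with its indices
theorem pv_gfold_char (ps : List (Int × String)) :
    ps.foldl pvStepG [] =
      (PySem.Set.ofList (ps.map (·.2))).map (fun k => (k, pvIdx ps k)) := by
  induction ps using List.reverseRecOn with
  | nil => rfl
  | append_singleton ps p ih =>
    rw [List.foldl_append, List.foldl_cons, List.foldl_nil, ih]
    have hset : PySem.Set.ofList ((ps ++ [p]).map (·.2)) =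
        PySem.Set.add (PySem.Set.ofList (ps.map (·.2))) p.2 := by
      rw [List.map_append]
      exact PySem.Set.ofList_append_singleton _ _
    have hidx : ∀ k, pvIdx (ps ++ [p]) k =
        pvIdx ps k ++ (if p.2 == k then [p.1] else []) := by
      intro k
      simp only [pvIdx, List.filterMap_append]
      congr 1
      by_cases h : p.2 = k <;> simp [h]
    set s := PySem.Set.ofList (ps.map (·.2)) with hs
    have hnodup : s.Nodup := PySem.Set.nodup_ofList _
    have hanymem : (s.map (fun k => (k, pvIdx ps k))).any (fun kv => kv.1 == p.2) =
        decide (p.2 ∈ s) := by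
      rw [List.any_map, Bool.eq_iff_iff]
      simp only [List.any_eq_true, Function.comp_apply, beq_iff_eq, decide_eq_true_eq]
      constructor
      · rintro ⟨a, ha, rfl⟩; exact ha
      · intro h; exact ⟨p.2, h, rfl⟩
    unfold pvStepG
    by_cases hmem : p.2 ∈ s
    · rw [hanymem]
      simp only [hmem, decide_true, if_true]
      rw [hset, PySem.Set.add_of_mem hmem, List.map_map]
      refine List.map_congr_left ?_
      intro k hk
      by_cases hkp : k = p.2
      · subst hkp
        simp [Function.comp, hidx]
      · have h1 : (k == p.2) = false := beq_eq_false_iff_ne.mpr hkp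
        have h2 : (p.2 == k) = false := beq_eq_false_iff_ne.mpr (Ne.symm hkp)
        simp [Function.comp, h1, hidx, h2]
    · rw [hanymem]
      simp only [hmem, decide_false, Bool.false_eq_true, if_false]
      rw [hset, PySem.Set.add_of_not_mem hmem, List.map_append, List.map_singleton]
      congr 1
      · refine List.map_congr_left ?_
        intro k hk
        have hkp : k ≠ p.2 := fun h => hmem (h ▸ hk)
        have h2 : (p.2 == k) = false := beq_eq_false_iff_ne.mpr (Ne.symm hkp)
        simp [hidx, h2]
      · have hz : pvIdx ps p.2 = [] := by
          rw [pvIdx, List.filterMap_eq_nil_iff]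
          intro q hq
          have : q.2 ≠ p.2 := by
            intro h
            exact hmem (by rw [hs, PySem.Set.mem_ofList]; exact h ▸ List.mem_map_of_mem hq)
          simp [this]
        simp [hidx, hz]

-- the comprehension's index list equals the grouping fold's index list
theorem pv_idx_eq (entries : List String) (k : String) :
    (PySem.List.pyRange 0 (entries.length : Int) 1).filter
      (fun i => PySem.List.pyGetD entries i "" == k) =
    pvIdx (PySem.List.enumerate entries) k := by
  rw [pvIdx, PySem.List.enumerate_eq_map_pyRange (d := ""), List.filterMap_map,
    ← List.filterMap_eq_filter]
  simp only [PySem.List.len_eq]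
  congr 1

-- ===== VERDICT (by name: the statement is the Claim_ definition above) =====
theorem hasDuplicatedEntry_py_spec : Claim_equal_hasDuplicatedEntry_py := by
  intro entries _
  unfold Spec_hasDuplicatedEntry_py hasDuplicatedEntry_py hasDuplicatedEntry_py_alt
  have hlist :
      (PySem.List.enumerate entries).foldl (pvStepA entries) [] =
      ((PySem.Dict.counter entries).items).foldl (fun acc (p : String × Int) =>
        if (1 : Int) < p.2 then
          acc ++ [(p.1, (PySem.List.pyRange 0 (entries.length : Int) 1).filter
            (fun i => PySem.List.pyGetD entries i "" == p.1))]
        else acc) [] := by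
    have hB := PySem.List.foldl_append_if
      (p := fun p : String × Int => decide ((1 : Int) < p.2))
      (f := fun p : String × Int => (p.1, (PySem.List.pyRange 0 (entries.length : Int) 1).filter
        (fun i => PySem.List.pyGetD entries i "" == p.1)))
      (l := (PySem.Dict.counter entries).items) (acc := ([] : List (String × List Int)))
    simp only [decide_eq_true_eq] at hB
    rw [hB, List.nil_append, PySem.Dict.items_counter, List.filter_map, List.map_map]
    have h0 := pv_fold_comm entries (PySem.List.enumerate entries) []
    simp only [List.filter_nil] at h0
    rw [h0, pv_gfold_char, PySem.List.map_snd_enumerate, List.filter_map]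
    have hq : ((pvQ entries) ∘ fun k => (k, pvIdx (PySem.List.enumerate entries) k)) =
        ((fun p : String × Int => decide ((1 : Int) < p.2)) ∘
          fun k => (k, (entries.count k : Int))) := by
      funext k
      simp [pvQ, Function.comp, PySem.List.count_eq]
    rw [hq]
    refine List.map_congr_left ?_
    intro k _
    simp [Function.comp, pv_idx_eq]
  simp only [PySem.Dict.foldl_insert_getD_add_one_eq_counter, hlist]
  rfl
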